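-- pv_equiv track=rewrite | github.com/wikid24/ffxiv_mmd_tools_helper | ffxiv_mmd_tools_helper/bone_morphs.py | parse_bone_morphs_data_from_csv
-- ===== SOURCE A (Python) =====
-- def parse_bone_morphs_data_from_csv (csv_data):
-- 	bone_morphs_dictionary = None
--
-- 	# Create an empty dictionary
-- 	bone_morphs_dictionary = {}
--
-- 	for bone_morphs_bone_data in csv_data:
--
-- 		#group the data based on the first row(bone_morph name)
-- 		bone_morph = bone_morphs_bone_data[0]
--
-- 		#if the bone_morph does not exist in the dictionary yet, create a new list for it
-- 		if bone_morph not in bone_morphs_dictionary: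
-- 			bone_morphs_dictionary[bone_morph] = []
--
-- 		#add the row to the dictionary
-- 		bone_morphs_dictionary[bone_morph].append(bone_morphs_bone_data)
--
-- 	# Iterate through the values of each row and parse out the first column (bone_morph)
-- 	# because we don't want to pass that as part of the bone data in the following step
-- 	for bone_morph in bone_morphs_dictionary:
-- 		bone_data = bone_morphs_dictionary[bone_morph]
-- 		for i, j in enumerate(bone_data):
-- 			bone_data[i] = j[1:]
--
-- 	return bone_morphs_dictionary
-- ===== SOURCE B (Python) =====
-- def parse_bone_morphs_data_from_csv(csv_data):
--     # Two staged scans: first collect the distinct morph names in first-seen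
--     # order, then build each group by filtering the whole table for that name.
--     keys = list(dict.fromkeys(row[0] for row in csv_data))
--     return {k: [row[1:] for row in csv_data if row[0] == k] for k in keys}
-- ===== Notes on version B (the rewrite author's own statement) =====
-- stated objective: alternative
-- what changed: B replaces A's incremental dict-grouping loop plus in-place slicing pass with two staged scans: an ordered dedup of the first column, then a per-key filter comprehension over the whole table that re-scans csv_data for each distinct key.
import Mathlib
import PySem

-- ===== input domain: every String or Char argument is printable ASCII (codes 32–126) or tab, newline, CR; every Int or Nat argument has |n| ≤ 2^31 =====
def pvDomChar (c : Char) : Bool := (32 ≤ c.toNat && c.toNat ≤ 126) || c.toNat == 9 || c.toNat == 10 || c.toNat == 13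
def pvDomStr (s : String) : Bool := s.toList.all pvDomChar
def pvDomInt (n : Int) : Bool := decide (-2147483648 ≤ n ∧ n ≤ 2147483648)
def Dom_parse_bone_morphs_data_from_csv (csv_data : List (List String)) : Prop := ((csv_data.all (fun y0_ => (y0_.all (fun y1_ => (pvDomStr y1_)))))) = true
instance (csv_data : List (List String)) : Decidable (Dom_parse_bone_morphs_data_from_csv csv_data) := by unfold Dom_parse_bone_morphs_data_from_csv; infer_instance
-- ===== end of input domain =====

-- B replaces A's incremental dict-grouping loop (plus its second in-place slicing pass) with
-- two staged scans: an ordered dedup of the first column, then one filter pass per distinct key.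
-- A mutates only the lists stored in its own dict, never its argument; equivalence is about the return value.

-- ===== PORT A =====
-- A's two passes: first loop builds {key: [full rows]}, second loop slices column 0 off every stored row.
def parse_bone_morphs_data_from_csv (csv_data : List (List String)) : List (String × List (List String)) :=
  let d1 : PySem.Dict String (List (List String)) :=
    csv_data.foldl (fun d row =>
      let bone_morph := PySem.List.pyGetD row 0 ""          -- row[0]; Pre_ guarantees row ≠ []
      let d' := if d.contains bone_morph then d else d.insert bone_morph []
      d'.modify bone_morph [] (fun l => l ++ [row])) PySem.Dict.empty
  let d2 :=
    d1.keys.foldl (fun d bone_morph =>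
      d.insert bone_morph ((d.getD bone_morph []).map (fun j => PySem.List.slice j (some 1) none))) d1
  d2.items

-- ===== PORT B =====
-- B: keys = list(dict.fromkeys(row[0] …)) is PySem.List.dedup; the dict comprehension is a
-- fold of inserts over those distinct keys, each value a filter-and-slice pass over csv_data.
def parse_bone_morphs_data_from_csv_alt (csv_data : List (List String)) : List (String × List (List String)) :=
  let keys := PySem.List.dedup (csv_data.map (fun row => PySem.List.pyGetD row 0 ""))
  (keys.foldl (fun d k =>
      d.insert k ((csv_data.filter (fun row => PySem.List.pyGetD row 0 "" == k)).map
        (fun row => PySem.List.slice row (some 1) none))) PySem.Dict.empty).items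

-- ===== PRECONDITION & SPEC =====
-- Pre_ excludes exactly the inputs where Python's row[0] raises IndexError (an empty row); B raises there too.
def Pre_parse_bone_morphs_data_from_csv (csv_data : List (List String)) : Prop :=
  ∀ row ∈ csv_data, row ≠ []
instance (csv_data : List (List String)) : Decidable (Pre_parse_bone_morphs_data_from_csv csv_data) := by unfold Pre_parse_bone_morphs_data_from_csv; infer_instance

def pvWitness_parse_bone_morphs_data_from_csv : List (List String) :=
  [["eye", "a", "b"], ["mouth", "c"], ["eye", "d", "e"]]

def Spec_parse_bone_morphs_data_from_csv (csv_data : List (List String)) (out : List (String × List (List String))) : Prop := out = parse_bone_morphs_data_from_csv_alt csv_data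
instance (csv_data : List (List String)) (out : List (String × List (List String))) : Decidable (Spec_parse_bone_morphs_data_from_csv csv_data out) := by unfold Spec_parse_bone_morphs_data_from_csv; infer_instance

-- ===== CLAIM (what is proved, stated in full; the proofs are below) =====
def Claim_equal_parse_bone_morphs_data_from_csv : Prop := ∀ (csv_data : List (List String)), Dom_parse_bone_morphs_data_from_csv csv_data → Pre_parse_bone_morphs_data_from_csv csv_data → Spec_parse_bone_morphs_data_from_csv csv_data (parse_bone_morphs_data_from_csv csv_data)

-- ===== LEMMAS AND PROOFS =====

-- Abbreviations used only by the proofs.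
def pvKey (row : List String) : String := PySem.List.pyGetD row 0 ""
def pvTail (row : List String) : List String := PySem.List.slice row (some 1) none
def pvG (p : String × List (List String)) : String × List (List String) := (p.1, p.2.map pvTail)

theorem pvKey_eq (row : List String) : PySem.List.pyGetD row 0 "" = pvKey row := rfl
theorem pvTail_eq (row : List String) : PySem.List.slice row (some 1) none = pvTail row := rfl

-- A's first-loop body equals a plain Dict.modify (the guard insert of [] is absorbed).
theorem pv_stepA_eq_modify (d : PySem.Dict String (List (List String))) (row : List String) :
    (if d.contains (pvKey row) then d else d.insert (pvKey row) []).modify (pvKey row) []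
        (fun l => l ++ [row])
      = d.modify (pvKey row) [] (fun l => l ++ [row]) := by
  by_cases h : d.contains (pvKey row)
  · simp [h]
  · simp only [h, Bool.false_eq_true, not_false_eq_true, if_neg]
    show (d.insert (pvKey row) []).insert (pvKey row)
        ((d.insert (pvKey row) []).getD (pvKey row) [] ++ [row])
      = d.insert (pvKey row) (d.getD (pvKey row) [] ++ [row])
    rw [PySem.Dict.getD_insert_self, PySem.Dict.insert_insert_self,
        PySem.Dict.getD_of_not_contains d [] (by simpa using h)]

-- get? on a raw items list whose prefix does not mention k.
theorem pv_get?_mk_append {ν : Type} (pre : List (String × ν)) (k : String) (v : ν)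
    (rest : List (String × ν)) (h : ∀ p ∈ pre, p.1 ≠ k) :
    (PySem.Dict.mk (pre ++ (k, v) :: rest)).get? k = some v := by
  have hpre : pre.find? (fun p => p.1 == k) = none :=
    List.find?_eq_none.mpr (fun p hp => by simp [h p hp])
  simp [PySem.Dict.get?, List.find?_append, hpre]

-- the replace-map of insert is the identity on entries whose key is not k
theorem pv_map_replace_id {ν : Type} (l : List (String × ν)) (k : String) (w : ν)
    (h : ∀ p ∈ l, p.1 ≠ k) :
    l.map (fun p => if (p.1 == k) = true then (k, w) else p) = l := by
  induction l with
  | nil => rfl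
  | cons p l ih =>
      have hp : ¬ ((p.1 == k) = true) := by simp [h p (by simp)]
      rw [List.map_cons, if_neg hp, ih (fun q hq => h q (by simp [hq]))]

-- PHASE 2 of A: re-inserting each key with its sliced rows maps pvG over the items list.
theorem pv_phase2 (rest pre : List (String × List (List String)))
    (h : ((pre ++ rest).map Prod.fst).Nodup) :
    ((rest.map Prod.fst).foldl
        (fun d k => d.insert k ((d.getD k []).map pvTail)) (PySem.Dict.mk (pre ++ rest))).items
      = pre ++ rest.map pvG := by
  induction rest generalizing pre with
  | nil => simp
  | cons p rest ih =>
      obtain ⟨k, v⟩ := p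
      have hnd : (pre.map Prod.fst ++ k :: rest.map Prod.fst).Nodup := by
        simpa using h
      have hkpre : ∀ q ∈ pre, q.1 ≠ k := by
        intro q hq hqk
        have h1 : q.1 ∈ pre.map Prod.fst := List.mem_map.mpr ⟨q, hq, rfl⟩
        rw [hqk] at h1
        exact (List.disjoint_of_nodup_append hnd) h1 (by simp)
      have hkrest : ∀ q ∈ rest, q.1 ≠ k := by
        intro q hq hqk
        have hk : ¬ k ∈ rest.map Prod.fst := (List.nodup_cons.mp hnd.of_append_right).1
        have h1 : q.1 ∈ rest.map Prod.fst := List.mem_map.mpr ⟨q, hq, rfl⟩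
        rw [hqk] at h1
        exact hk h1
      have hget : (PySem.Dict.mk (pre ++ (k, v) :: rest)).get? k = some v :=
        pv_get?_mk_append pre k v rest hkpre
      have hgetD : (PySem.Dict.mk (pre ++ (k, v) :: rest)).getD k [] = v :=
        PySem.Dict.getD_of_get?_eq_some _ [] hget
      have hcont : (PySem.Dict.mk (pre ++ (k, v) :: rest)).contains k = true := by
        rw [PySem.Dict.contains_eq_isSome_get?, hget]; rfl
      have hstep :
          (PySem.Dict.mk (pre ++ (k, v) :: rest)).insert k
              (((PySem.Dict.mk (pre ++ (k, v) :: rest)).getD k []).map pvTail)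
            = PySem.Dict.mk ((pre ++ [(k, v.map pvTail)]) ++ rest) := by
        apply PySem.Dict.ext
        rw [PySem.Dict.items_insert_of_contains _ _ hcont, hgetD]
        show (pre ++ (k, v) :: rest).map (fun p => if (p.1 == k) = true then (k, v.map pvTail) else p)
            = (pre ++ [(k, v.map pvTail)]) ++ rest
        rw [List.map_append, List.map_cons,
            pv_map_replace_id pre k _ hkpre, pv_map_replace_id rest k _ hkrest]
        simp
      simp only [List.map_cons, List.foldl_cons, hstep]
      rw [ih (pre ++ [(k, v.map pvTail)]) (by simpa using h)]
      simp [pvG]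

-- phase 2 stated on a dict with nodup keys
theorem pv_phase2' (d : PySem.Dict String (List (List String))) (h : d.keys.Nodup) :
    (d.keys.foldl (fun d k => d.insert k ((d.getD k []).map pvTail)) d).items
      = d.items.map pvG := by
  have := pv_phase2 d.items [] (by simpa [PySem.Dict.keys] using h)
  exact this

-- getD of A's grouping fold: the rows whose key is c, in order.
theorem pv_getD_foldA (csv : List (List String)) (c : String) :
    ((csv.foldl (fun d row => d.modify (pvKey row) [] (fun l => l ++ [row]))
        PySem.Dict.empty).getD c [])
      = csv.filter (fun row => pvKey row == c) := by
  have h := PySem.Dict.getD_foldl_modify_append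
    (csv.map (fun r => (pvKey r, r))) PySem.Dict.empty c
  rw [List.foldl_map, List.filter_map, List.map_map] at h
  simpa [Function.comp_def] using h

-- ===== VERDICT (by name: the statement is the Claim_ definition above) =====
theorem parse_bone_morphs_data_from_csv_spec : Claim_equal_parse_bone_morphs_data_from_csv := by
  intro csv _ _
  unfold Spec_parse_bone_morphs_data_from_csv
  unfold parse_bone_morphs_data_from_csv parse_bone_morphs_data_from_csv_alt
  simp only [pvKey_eq, pvTail_eq]
  -- rewrite A's first loop into the plain modify fold
  have hA1 :
      (csv.foldl (fun d row =>
          let bone_morph := pvKey row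
          let d' := if d.contains bone_morph then d else d.insert bone_morph []
          d'.modify bone_morph [] (fun l => l ++ [row])) PySem.Dict.empty)
        = csv.foldl (fun d row => d.modify (pvKey row) [] (fun l => l ++ [row]))
            PySem.Dict.empty :=
    PySem.List.foldl_congr_mem csv _ _ _ (fun d row _ => pv_stepA_eq_modify d row)
  rw [hA1]
  set dA := csv.foldl (fun d row => d.modify (pvKey row) [] (fun l => l ++ [row]))
      PySem.Dict.empty with hdA
  have hnodupA : dA.keys.Nodup :=
    PySem.Dict.nodup_keys_foldl_modify_key csv pvKey [] (fun _ _ l => l ++ [_])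
      PySem.Dict.empty PySem.Dict.nodup_keys_empty
  -- A's keys are the ordered dedup of the first column, i.e. B's key list
  have hkeys : dA.keys = PySem.List.dedup (csv.map pvKey) := by
    rw [hdA, PySem.Dict.keys_foldl_modify_key csv pvKey [] (fun _ row l => l ++ [row])
          PySem.Dict.empty]
    simp [PySem.Dict.keys_empty, PySem.Set.update_nil_left]
  -- B's fold inserts fresh distinct keys into the empty dict
  have hB :
      ((PySem.List.dedup (csv.map pvKey)).foldl (fun d k =>
          d.insert k ((csv.filter (fun row => pvKey row == k)).map pvTail))
        PySem.Dict.empty).items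
      = (PySem.List.dedup (csv.map pvKey)).map
          (fun k => (k, (csv.filter (fun row => pvKey row == k)).map pvTail)) := by
    have h := PySem.Dict.items_foldl_insert_fresh
      (l := PySem.List.dedup (csv.map pvKey))
      (k := fun k => k)
      (v := fun k => (csv.filter (fun row => pvKey row == k)).map pvTail)
      (d := PySem.Dict.empty)
      (by intro a _; exact PySem.Dict.contains_empty a)
      (by simpa using PySem.List.nodup_dedup (csv.map pvKey))
    simpa using h
  rw [pv_phase2' dA hnodupA, PySem.Dict.items_eq_map_keys dA hnodupA [], List.map_map, hB, hkeys]
  apply List.map_congr_left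
  intro k _
  show pvG (k, dA.getD k []) = (k, (csv.filter (fun row => pvKey row == k)).map pvTail)
  rw [hdA, pv_getD_foldA csv k]
  rfl
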